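-- pv_equiv track=rewrite | github.com/osak/ICFPC2020 | amylase/curry.py | insert_paren
-- ===== SOURCE A (Python) =====
-- def serialize(t):
--     if type(t) == tuple:
--         x, y = t
--         return "(delay ((force {}) {}))".format(serialize(x), serialize(y))
--     else:
--         return "{}".format(t)
--
-- def insert_paren(eq):
--     tokens = eq.split()
--     stack = []
--     overrides = {"div", "cons", "car", "cdr"}
--     for token in reversed(tokens):
--         if token == "ap":
--             applied = (stack[-1], stack[-2])
--             stack.pop()
--             stack.pop()
--             stack.append(applied)
--         elif token in overrides:
--             stack.append("my" + token)
--         else: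
--             stack.append(token)
--     assert len(stack) == 3
--     return "({} {})".format(stack[2], serialize(stack[0]))
-- ===== SOURCE B (Python) =====
-- # Single left-to-right pass with a stack of pending 'ap' parents,
-- # instead of A's reverse-pass shift-reduce over completed subtrees.
-- def serialize(t):
--     if type(t) == tuple:
--         x, y = t
--         return "(delay ((force {}) {}))".format(serialize(x), serialize(y))
--     else:
--         return "{}".format(t)
--
-- def insert_paren(eq):
--     tokens = eq.split()
--     overrides = {"div", "cons", "car", "cdr"}
--     forest = []
--     pending = []  # 'ap' nodes awaiting children: None = no child yet, otherwise the first child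
--     for token in tokens:
--         if token == "ap":
--             pending.append(None)
--             continue
--         t = "my" + token if token in overrides else token
--         while True:
--             if not pending:
--                 forest.append(t)
--                 break
--             if pending[-1] is None:
--                 pending[-1] = t
--                 break
--             t = (pending.pop(), t)
--     assert not pending
--     assert len(forest) == 3
--     return "({} {})".format(forest[0], serialize(forest[2]))
-- ===== Notes on version B (the rewrite author's own statement) =====
-- stated objective: alternative
-- what changed: Replaces A's right-to-left shift-reduce pass (a stack of completed subtrees, combined when an 'ap' is met) by a single left-to-right pass that keeps a stack of pending 'ap' parents and attaches each completed expression to its parent as it finishes; Pre_ restricts to the inputs on which A returns (every 'ap' followed by two complete expressions, exactly three top-level expressions), since A raises IndexError/AssertionError elsewhere.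
import Mathlib
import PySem

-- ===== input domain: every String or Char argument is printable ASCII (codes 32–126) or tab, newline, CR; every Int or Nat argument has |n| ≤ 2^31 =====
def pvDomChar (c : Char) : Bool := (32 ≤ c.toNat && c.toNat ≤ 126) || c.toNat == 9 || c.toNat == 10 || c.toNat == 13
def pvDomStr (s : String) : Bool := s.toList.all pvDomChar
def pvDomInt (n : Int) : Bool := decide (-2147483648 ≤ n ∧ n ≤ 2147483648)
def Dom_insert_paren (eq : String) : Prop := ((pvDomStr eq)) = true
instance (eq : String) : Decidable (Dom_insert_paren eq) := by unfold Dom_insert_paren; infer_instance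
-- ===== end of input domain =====

-- B replaces A's reverse-pass shift-reduce stack by a single left-to-right pass with a
-- stack of pending 'ap' parents (objective: alternative algorithm, same O(n) cost).

-- ===== PORT A =====

-- Python parse trees here are nested 2-tuples of strings
inductive PTree
  | leaf : String → PTree
  | node : PTree → PTree → PTree
deriving DecidableEq, Repr

-- models Python repr(s); exact for the strings reachable here (split() tokens:
-- printable ASCII without whitespace, so only backslash and quotes need escaping)
def pyReprStr (s : String) : String :=
  let cs := s.toList
  if cs.contains '\'' && !cs.contains '"' then
    "\"" ++ String.ofList (cs.flatMap fun c => if c = '\\' then ['\\', '\\'] else [c]) ++ "\""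
  else
    "'" ++ String.ofList (cs.flatMap fun c =>
      if c = '\\' then ['\\', '\\'] else if c = '\'' then ['\\', '\''] else [c]) ++ "'"

-- models Python repr(t) on a parse tree (tuple repr)
def pyRepr : PTree → String
  | .leaf s => pyReprStr s
  | .node x y => "(" ++ pyRepr x ++ ", " ++ pyRepr y ++ ")"

-- models "{}".format(t): a str prints as-is, a tuple via its repr
def pyStr : PTree → String
  | .leaf s => s
  | .node x y => "(" ++ pyRepr x ++ ", " ++ pyRepr y ++ ")"

-- the Python helper serialize(t), shared verbatim by A and B
def serializeT : PTree → String
  | .node x y => "(delay ((force " ++ serializeT x ++ ") " ++ serializeT y ++ "))"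
  | .leaf s => s

def overrides : PySem.Set String := PySem.Set.ofList ["div", "cons", "car", "cdr"]

-- A's loop body; the Lean list keeps the Python stack top-first (head = stack[-1])
def stepA (stack : List PTree) (token : String) : List PTree :=
  if token = "ap" then
    match stack with
    | t1 :: t2 :: rest => .node t1 t2 :: rest   -- applied = (stack[-1], stack[-2]); pop; pop; append
    | _ => stack                                 -- Python raises IndexError here; Pre_ excludes it
  else if overrides.contains token then .leaf ("my" ++ token) :: stack
  else .leaf token :: stack

def insert_paren (eq : String) : String :=
  let tokens := PySem.Str.split₀ eq
  let stack := tokens.reverse.foldl stepA []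
  -- assert len(stack) == 3; with the stack top-first, Python's stack[2] is the head, stack[0] the bottom
  match stack with
  | [s2, _s1, s0] => "(" ++ pyStr s2 ++ " " ++ serializeT s0 ++ ")"
  | _ => ""                                      -- Python raises AssertionError here; Pre_ excludes it

-- ===== PORT B =====

-- B's inner while loop: a completed tree t meets the pending-parent stack
def resolve (t : PTree) (forestRev : List PTree) (pending : List (Option PTree)) :
    List PTree × List (Option PTree) :=
  match pending with
  | [] => (t :: forestRev, [])
  | none :: rest => (forestRev, some t :: rest)
  | some x :: rest => resolve (.node x t) forestRev rest

def stepB (st : List PTree × List (Option PTree)) (token : String) :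
    List PTree × List (Option PTree) :=
  if token = "ap" then (st.1, none :: st.2)
  else if overrides.contains token then resolve (.leaf ("my" ++ token)) st.1 st.2
  else resolve (.leaf token) st.1 st.2

def insert_paren_alt (eq : String) : String :=
  let tokens := PySem.Str.split₀ eq
  let st := tokens.foldl stepB ([], [])
  let forest := st.1.reverse
  -- assert not pending; assert len(forest) == 3; then forest[0] and forest[2]
  if st.2 = [] ∧ forest.length = 3 then
    match PySem.List.pyGet? forest 0, PySem.List.pyGet? forest 2 with
    | some x, some z => "(" ++ pyStr x ++ " " ++ serializeT z ++ ")"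
    | _, _ => ""
  else ""                                        -- Python raises AssertionError; Pre_ excludes it

-- ===== PRECONDITION & SPEC =====

-- token weight sum: non-"ap" tokens count +1, "ap" tokens count -1
def tokVal : List String → Int
  | [] => 0
  | t :: r => (if t = "ap" then -1 else 1) + tokVal r

-- Pre_ = exactly the inputs where Python A returns: every "ap" is followed by at least two
-- complete expressions (otherwise IndexError) and the tokens form exactly three expressions
-- (tokVal = 3; otherwise AssertionError).
def Pre_insert_paren (eq : String) : Prop :=
  let tokens := PySem.Str.split₀ eq
  (∀ i < tokens.length, tokens[i]! = "ap" → 2 ≤ tokVal (tokens.drop (i + 1))) ∧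
  tokVal tokens = 3

instance (eq : String) : Decidable (Pre_insert_paren eq) := by
  unfold Pre_insert_paren; infer_instance

def pvWitness_insert_paren : String := "ap cons x y z"

def Spec_insert_paren (eq : String) (out : String) : Prop := out = insert_paren_alt eq
instance (eq : String) (out : String) : Decidable (Spec_insert_paren eq out) := by
  unfold Spec_insert_paren; infer_instance

-- ===== CLAIM (what is proved, stated in full; the proofs are below) =====
def Claim_equal_insert_paren : Prop :=
  ∀ (eq : String), Dom_insert_paren eq → Pre_insert_paren eq →
    Spec_insert_paren eq (insert_paren eq)

-- ===== LEMMAS AND PROOFS =====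

-- structural form of the "every ap has two complete expressions after it" condition
def suffOK : List String → Prop
  | [] => True
  | t :: r => (t = "ap" → 2 ≤ tokVal r) ∧ suffOK r

theorem pre_iff_suffOK (l : List String) :
    (∀ i < l.length, l[i]! = "ap" → 2 ≤ tokVal (l.drop (i + 1))) ↔ suffOK l := by
  induction l with
  | nil => simp [suffOK]
  | cons t r ih =>
    constructor
    · intro h
      refine ⟨fun ht => ?_, ih.mp fun i hi hap => ?_⟩
      · simpa [ht] using h 0 (by simp) (by simpa using ht)
      · simpa using h (i + 1) (by simpa using hi) (by simpa using hap)
    · rintro ⟨h1, h2⟩ i hi hap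
      cases i with
      | zero => simpa using h1 (by simpa using hap)
      | succ j => exact (ih.mpr h2) j (by simpa using hi) (by simpa using hap)

-- A's reverse-pass fold, as a foldr over the token list
def runA (l : List String) : List PTree := l.foldr (fun t s => stepA s t) []

theorem length_runA (l : List String) (h : suffOK l) :
    ((runA l).length : Int) = tokVal l := by
  induction l with
  | nil => simp [runA, tokVal]
  | cons t r ih =>
    obtain ⟨h1, h2⟩ := h
    have ihr := ih h2
    show ((stepA (runA r) t).length : Int) = tokVal (t :: r)
    by_cases hap : t = "ap"
    · have hv : 2 ≤ tokVal r := h1 hap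
      have hlen : 2 ≤ (runA r).length := by omega
      match hm : runA r, hlen with
      | t1 :: t2 :: rest, _ =>
        rw [hm] at ihr
        simp [stepA, hap, tokVal] at ihr ⊢
        omega
    · simp only [stepA, if_neg hap]
      split_ifs <;> (simp [tokVal, hap] at ihr ⊢; omega)

-- feeding a list of completed trees, left to right, into B's state
def feed (st : List PTree × List (Option PTree)) (s : List PTree) :
    List PTree × List (Option PTree) :=
  s.foldl (fun st t => resolve t st.1 st.2) st

theorem foldB_eq_feed_runA (l : List String) (h : suffOK l)
    (st : List PTree × List (Option PTree)) :
    l.foldl stepB st = feed st (runA l) := by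
  induction l generalizing st with
  | nil => simp [runA, feed]
  | cons t r ih =>
    obtain ⟨h1, h2⟩ := h
    have hrun : runA (t :: r) = stepA (runA r) t := rfl
    by_cases hap : t = "ap"
    · have hv : 2 ≤ tokVal r := h1 hap
      have hlen : 2 ≤ (runA r).length := by
        have := length_runA r h2; omega
      match hm : runA r, hlen with
      | t1 :: t2 :: rest, _ =>
        have lhs : (t :: r).foldl stepB st = feed (st.1, none :: st.2) (t1 :: t2 :: rest) := by
          rw [List.foldl_cons, ih h2, hm, stepB, if_pos hap]
        rw [lhs, hrun, hm]
        simp [stepA, hap, feed, resolve]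
    · have lhs : (t :: r).foldl stepB st = r.foldl stepB (stepB st t) := List.foldl_cons ..
      rw [lhs, ih h2, hrun]
      simp only [stepA, stepB, if_neg hap, feed]
      split_ifs <;> simp

-- ===== VERDICT (by name: the statement is the Claim_ definition above) =====
theorem insert_paren_spec : Claim_equal_insert_paren := by
  intro eq _hDom hPre
  obtain ⟨hIdx, hVal⟩ := hPre
  set tokens := PySem.Str.split₀ eq with htok
  have hOK : suffOK tokens := (pre_iff_suffOK tokens).mp hIdx
  have hlen : (runA tokens).length = 3 := by
    have := length_runA tokens hOK; omega
  match hm : runA tokens, hlen with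
  | [a, b, c], _ =>
    have hA : insert_paren eq = "(" ++ pyStr a ++ " " ++ serializeT c ++ ")" := by
      show (match (PySem.Str.split₀ eq).reverse.foldl stepA [] with
        | [s2, _s1, s0] => "(" ++ pyStr s2 ++ " " ++ serializeT s0 ++ ")"
        | _ => "") = _
      rw [List.foldl_reverse, ← htok]
      have : tokens.foldr (fun x y => stepA y x) [] = [a, b, c] := hm
      rw [this]
    have hB : insert_paren_alt eq = "(" ++ pyStr a ++ " " ++ serializeT c ++ ")" := by
      simp only [insert_paren_alt]
      rw [← htok, foldB_eq_feed_runA tokens hOK, hm]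
      simp [feed, resolve, PySem.List.pyGet?, PySem.List.pyIdx?]
    rw [Spec_insert_paren, hA, hB]
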